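-- pv_equiv track=rewrite | github.com/AllanDwyre/Medical-Semantic-Extraction | src/visualization/viewer.py | formalize_path
-- ===== SOURCE A (Python) =====
-- def formalize_path(paths: dict[str, str]) -> dict[str, str]:
-- 	last_segments = {}
-- 	for key, path in paths.items():
-- 		segments = [seg.strip() for seg in path.split('->')]
-- 		last_segments[key] = segments[-1] if segments else ''
--
-- 	result = {}
--
-- 	for key, path in paths.items():
-- 		segments = [seg.strip() for seg in path.split('->')]
--
-- 		for other_key, last_seg in last_segments.items():
-- 			if other_key != key and segments[0] == last_seg:
-- 				segments[0] = other_key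
-- 				break
--
-- 		result[key] = ' -> '.join(segments)
-- 	return result
-- ===== SOURCE B (Python) =====
-- def formalize_path(paths: dict[str, str]) -> dict[str, str]:
-- 	# Index: last segment -> first two keys (in insertion order) whose path ends
-- 	# with that segment; the first matching *other* key is always among these two.
-- 	first_keys = {}
-- 	for key, path in paths.items():
-- 		last = path.split('->')[-1].strip()
-- 		bucket = first_keys.setdefault(last, [])
-- 		if len(bucket) < 2:
-- 			bucket.append(key)
--
-- 	result = {}
-- 	for key, path in paths.items():
-- 		segments = [seg.strip() for seg in path.split('->')]
-- 		repl = next((k for k in first_keys.get(segments[0], []) if k != key), None)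
-- 		if repl is not None:
-- 			segments[0] = repl
-- 		result[key] = ' -> '.join(segments)
-- 	return result
-- ===== Notes on version B (the rewrite author's own statement) =====
-- stated objective: faster
-- what changed: Instead of scanning all keys' last segments for every key (A's nested loop), B builds one index from last segment to the first two keys having it and resolves each key's replacement with a single dictionary lookup.
import Mathlib
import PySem

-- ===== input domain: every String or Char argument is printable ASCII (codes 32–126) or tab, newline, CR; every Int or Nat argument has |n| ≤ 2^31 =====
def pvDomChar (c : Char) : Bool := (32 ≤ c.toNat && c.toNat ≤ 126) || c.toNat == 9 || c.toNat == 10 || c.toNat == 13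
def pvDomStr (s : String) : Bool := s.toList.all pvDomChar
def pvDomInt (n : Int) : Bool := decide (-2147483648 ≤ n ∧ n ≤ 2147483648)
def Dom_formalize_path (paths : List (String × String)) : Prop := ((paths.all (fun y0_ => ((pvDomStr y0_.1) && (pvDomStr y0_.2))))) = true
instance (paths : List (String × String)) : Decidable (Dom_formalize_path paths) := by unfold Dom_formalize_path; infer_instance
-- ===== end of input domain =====

-- B replaces A's inner scan over all keys by a precomputed last-segment → first-two-keys index,
-- making the rewrite one dictionary lookup per key (objective: faster).


-- ===== PORT A =====
-- path.split('->'): the separator is the non-empty literal "->", so split? is always some (exact)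
def pvSplit (path : String) : List String :=
  (PySem.Str.split? path "->").getD []

-- segments = [seg.strip() for seg in path.split('->')]
def pvStripSegs (path : String) : List String :=
  (pvSplit path).map PySem.Str.strip

-- the inner 'for other_key, last_seg in last_segments.items(): … break' loop of A
-- (segments[0] is total here: split always returns a nonempty list, so headD "" is exact)
def pvAInner (key : String) (segs : List String) : List (String × String) → List String
  | [] => segs
  | (ok, ls) :: rest =>
    if ok ≠ key ∧ segs.headD "" = ls then segs.set 0 ok
    else pvAInner key segs rest

def formalize_path (paths : List (String × String)) : List (String × String) :=
  let last_segments : PySem.Dict String String :=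
    paths.foldl (fun d kp =>
      let segs := pvStripSegs kp.2
      d.insert kp.1 (if segs ≠ [] then segs.getLastD "" else "")) PySem.Dict.empty
  let result : PySem.Dict String String :=
    paths.foldl (fun res kp =>
      let segs := pvStripSegs kp.2
      let segs' := pvAInner kp.1 segs last_segments.items
      res.insert kp.1 (PySem.Str.join " -> " segs')) PySem.Dict.empty
  result.items

-- ===== PORT B =====
-- last = path.split('->')[-1].strip()   ([-1] is total: split always returns a nonempty list)
def pvLastOf (path : String) : String :=
  PySem.Str.strip ((pvSplit path).getLastD "")

-- one step of B's first loop: bucket = first_keys.setdefault(last, []); append if len < 2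
def pvBStep (d : PySem.Dict String (List String)) (kp : String × String) :
    PySem.Dict String (List String) :=
  let last := pvLastOf kp.2
  let bucket := d.getD last []
  if bucket.length < 2 then d.insert last (bucket ++ [kp.1]) else d

-- next((k for k in bucket if k != key), None)
def pvBFirst (key : String) : List String → Option String
  | [] => none
  | k :: rest => if k ≠ key then some k else pvBFirst key rest

def formalize_path_alt (paths : List (String × String)) : List (String × String) :=
  let first_keys : PySem.Dict String (List String) :=
    paths.foldl pvBStep PySem.Dict.empty
  let result : PySem.Dict String String :=
    paths.foldl (fun res kp =>
      let segs := (pvSplit kp.2).map PySem.Str.strip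
      let segs' := match pvBFirst kp.1 (first_keys.getD (segs.headD "") []) with
        | some k => segs.set 0 k
        | none => segs
      res.insert kp.1 (PySem.Str.join " -> " segs')) PySem.Dict.empty
  result.items

-- ===== PRECONDITION & SPEC =====
-- Pre_ excludes association lists with duplicate keys: A's argument is a Python dict, whose
-- items always carry distinct keys, so such lists do not correspond to any input A receives.
def Pre_formalize_path (paths : List (String × String)) : Prop :=
  (paths.map Prod.fst).Nodup
instance (paths : List (String × String)) : Decidable (Pre_formalize_path paths) := by unfold Pre_formalize_path; infer_instance

def pvWitness_formalize_path : (List (String × String)) :=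
  [("a", "x -> b"), ("b", "c"), ("c", "b")]

def Spec_formalize_path (paths : List (String × String)) (out : List (String × String)) : Prop := out = formalize_path_alt paths
instance (paths : List (String × String)) (out : List (String × String)) : Decidable (Spec_formalize_path paths out) := by unfold Spec_formalize_path; infer_instance

-- ===== CLAIM (what is proved, stated in full; the proofs are below) =====
def Claim_equal_formalize_path : Prop := ∀ (paths : List (String × String)), Dom_formalize_path paths → Pre_formalize_path paths → Spec_formalize_path paths (formalize_path paths)

-- ===== LEMMAS AND PROOFS =====

-- split never returns the empty list
theorem pvGo_ne_nil (sep : List Char) :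
    ∀ (fuel : Nat) (l cur : List Char) (acc : List (List Char)),
      PySem.Chars.splitOn.go sep fuel l cur acc ≠ [] := by
  intro fuel
  induction fuel with
  | zero =>
    intro l cur acc
    simp [PySem.Chars.splitOn.go]
  | succ n ih =>
    intro l cur acc
    cases l with
    | nil => simp [PySem.Chars.splitOn.go]
    | cons c rest =>
      rw [show PySem.Chars.splitOn.go sep (n + 1) (c :: rest) cur acc =
          if sep.isPrefixOf (c :: rest) = true then
            PySem.Chars.splitOn.go sep n (List.drop sep.length (c :: rest)) [] (cur.reverse :: acc)
          else PySem.Chars.splitOn.go sep n rest (c :: cur) acc from rfl]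
      split_ifs <;> apply ih

theorem pvSplit_ne_nil (p : String) : pvSplit p ≠ [] := by
  simp only [pvSplit, PySem.Str.split?, PySem.Chars.split?, PySem.Chars.splitOn]
  intro h
  simp only [show ("->".toList).isEmpty = false from rfl, Bool.false_eq_true, ite_false,
    Option.map_some, Option.getD_some, List.map_eq_nil_iff] at h
  exact pvGo_ne_nil _ _ _ _ _ h

theorem pvStripSegs_ne_nil (p : String) : pvStripSegs p ≠ [] := by
  simp only [pvStripSegs, ne_eq, List.map_eq_nil_iff]
  exact pvSplit_ne_nil p

-- A's stored last segment equals B's pvLastOf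
theorem pvLast_eq (p : String) :
    (if pvStripSegs p ≠ [] then (pvStripSegs p).getLastD "" else "") = pvLastOf p := by
  rw [if_pos (pvStripSegs_ne_nil p)]
  show ((pvSplit p).map PySem.Str.strip).getLastD "" = PySem.Str.strip ((pvSplit p).getLastD "")
  rcases List.eq_nil_or_concat (pvSplit p) with h | ⟨l, a, h⟩
  · exact absurd h (pvSplit_ne_nil p)
  · rw [h]
    simp

-- the pure search behind A's inner loop: first other_key with matching last segment
def pvFindA (key s0 : String) : List (String × String) → Option String
  | [] => none
  | (ok, ls) :: rest =>
    if ok ≠ key ∧ s0 = ls then some ok else pvFindA key s0 rest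

theorem pvAInner_eq_find (key : String) (segs : List String) (L : List (String × String)) :
    pvAInner key segs L =
      match pvFindA key (segs.headD "") L with
      | some ok => segs.set 0 ok
      | none => segs := by
  induction L with
  | nil => rfl
  | cons p rest ih =>
    obtain ⟨ok, ls⟩ := p
    simp only [pvAInner, pvFindA]
    split_ifs with h
    · rfl
    · exact ih

theorem pvBFirst_of_not_mem (key : String) (l : List String) (h : key ∉ l) :
    pvBFirst key l = l.head? := by
  cases l with
  | nil => rfl
  | cons k rest =>
    have hk : k ≠ key := fun e => h (e ▸ List.mem_cons_self)
    simp [pvBFirst, hk]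

theorem pvFindA_eq_bfirst (key s0 : String) (L : List (String × String))
    (hnd : (L.map Prod.fst).Nodup) :
    pvFindA key s0 L =
      pvBFirst key (((L.filter (fun q => q.2 == s0)).map Prod.fst).take 2) := by
  induction L with
  | nil => rfl
  | cons p rest ih =>
    obtain ⟨ok, ls⟩ := p
    simp only [List.map_cons, List.nodup_cons] at hnd
    obtain ⟨hok, hrest⟩ := hnd
    by_cases hls : ls = s0
    · subst hls
      simp only [pvFindA, List.filter_cons, beq_self_eq_true, if_pos, List.map_cons,
        List.take_succ_cons]
      by_cases hk : ok = key
      · subst hk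
        rw [if_neg (by simp), ih hrest]
        have hsub : ∀ n, ok ∉ ((rest.filter (fun q => q.2 == ls)).map Prod.fst).take n := by
          intro n hm
          apply hok
          rcases List.mem_map.mp (List.mem_of_mem_take hm) with ⟨q, hq, hq1⟩
          exact List.mem_map.mpr ⟨q, List.mem_of_mem_filter hq, hq1⟩
        rw [pvBFirst_of_not_mem _ _ (hsub 2)]
        rw [show pvBFirst ok (ok :: ((rest.filter (fun q => q.2 == ls)).map Prod.fst).take 1)
            = pvBFirst ok (((rest.filter (fun q => q.2 == ls)).map Prod.fst).take 1) from by
          simp [pvBFirst]]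
        rw [pvBFirst_of_not_mem _ _ (hsub 1)]
        cases (rest.filter (fun q => q.2 == ls)).map Prod.fst with
        | nil => rfl
        | cons a t => simp
      · rw [if_pos ⟨hk, trivial⟩]
        simp [pvBFirst, hk]
    · have hbeq : ((ls : String) == s0) = false := by simp [hls]
      rw [show pvFindA key s0 ((ok, ls) :: rest) = pvFindA key s0 rest from by
        simp only [pvFindA]
        rw [if_neg (by rintro ⟨-, h⟩; exact hls h.symm)]]
      simp only [List.filter_cons, hbeq, Bool.false_eq_true, ite_false]
      exact ih hrest

-- the bucket dict of B: each bucket holds the first two keys with that last segment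
theorem pvBuckets_getD (l : List (String × String)) (d : PySem.Dict String (List String))
    (hd : ∀ u, (d.getD u []).length ≤ 2) (v : String) :
    (l.foldl pvBStep d).getD v []
      = (d.getD v [] ++ (l.filter (fun kp => pvLastOf kp.2 == v)).map Prod.fst).take 2 := by
  induction l generalizing d with
  | nil =>
    rw [List.foldl_nil, List.filter_nil, List.map_nil, List.append_nil,
      List.take_of_length_le (hd v)]
  | cons kp rest ih =>
    rw [List.foldl_cons]
    have hstep : pvBStep d kp =
        if (d.getD (pvLastOf kp.2) []).length < 2 then
          d.insert (pvLastOf kp.2) (d.getD (pvLastOf kp.2) [] ++ [kp.1])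
        else d := rfl
    have hinv : ∀ u, ((pvBStep d kp).getD u []).length ≤ 2 := by
      intro u
      rw [hstep]
      split_ifs with hlen
      · rw [PySem.Dict.getD_insert]
        split_ifs with hu
        · simp only [List.length_append, List.length_cons, List.length_nil]
          omega
        · exact hd u
      · exact hd u
    rw [ih _ hinv, List.filter_cons]
    by_cases hv : pvLastOf kp.2 = v
    · simp only [hv, beq_self_eq_true, if_pos, List.map_cons]
      by_cases hlen : (d.getD v []).length < 2
      · rw [hstep, hv, if_pos hlen, PySem.Dict.getD_insert, if_pos rfl]
        simp
      · have h2 : (d.getD v []).length = 2 := by have := hd v; omega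
        rw [hstep, hv, if_neg hlen]
        rw [List.take_append_of_le_length (by omega),
          List.take_append_of_le_length (by omega)]
    · have hbeq : (pvLastOf kp.2 == v) = false := by simp [hv]
      simp only [hbeq, Bool.false_eq_true, ite_false]
      rw [hstep]
      split_ifs with hlen
      · rw [PySem.Dict.getD_insert, if_neg (fun h => hv h.symm)]
      · rfl

theorem pvFilter_map_comm (paths : List (String × String)) (s0 : String) :
    ((paths.map (fun kp => (kp.1, pvLastOf kp.2))).filter (fun q => q.2 == s0)).map Prod.fst
      = (paths.filter (fun kp => pvLastOf kp.2 == s0)).map Prod.fst := by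
  rw [List.filter_map, List.map_map]
  rfl

-- ===== VERDICT (by name: the statement is the Claim_ definition above) =====
theorem formalize_path_spec : Claim_equal_formalize_path := by
  intro paths _hdom hpre
  unfold Spec_formalize_path
  unfold formalize_path formalize_path_alt
  simp only []
  congr 1
  apply PySem.List.foldl_congr_mem
  intro res kp hkp
  have hitems :
      (paths.foldl (fun d kp =>
          let segs := pvStripSegs kp.2
          d.insert kp.1 (if segs ≠ [] then segs.getLastD "" else "")) PySem.Dict.empty).items
        = paths.map (fun kp => (kp.1, pvLastOf kp.2)) := by
    have hcongr : (paths.foldl (fun d kp =>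
          let segs := pvStripSegs kp.2
          d.insert kp.1 (if segs ≠ [] then segs.getLastD "" else "")) PySem.Dict.empty)
        = paths.foldl (fun d a => d.insert a.1 (pvLastOf a.2)) PySem.Dict.empty := by
      apply PySem.List.foldl_congr_mem
      intro d kp' _
      simp only []
      rw [pvLast_eq]
    rw [hcongr]
    have hfresh := PySem.Dict.items_foldl_insert_fresh (l := paths)
      (k := Prod.fst) (v := fun kp => pvLastOf kp.2) (d := PySem.Dict.empty)
      (by intro a _; simp) hpre
    simpa using hfresh
  congr 1
  rw [hitems, pvAInner_eq_find]
  rw [pvFindA_eq_bfirst _ _ _ (by rw [List.map_map]; exact hpre)]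
  rw [pvFilter_map_comm]
  rw [pvBuckets_getD paths PySem.Dict.empty (by intro u; simp) _]
  simp only [PySem.Dict.getD_empty, List.nil_append]
  rfl
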